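-- pv_equiv track=rewrite | github.com/livingstaccato/provide-foundation | mutants/src/provide/foundation/errors/context.py | x__group_foundation_error_context__mutmut_orig
-- ===== SOURCE A (Python) =====
-- from typing import Any
--
-- def x__group_foundation_error_context__mutmut_orig(error_context: dict[str, Any]) -> dict[str, dict[str, Any]]:
--     """Group FoundationError context items by namespace."""
--     grouped: dict[str, dict[str, Any]] = {}
--
--     for key, value in error_context.items():
--         if "." in key:
--             namespace, subkey = key.split(".", 1)
--             if namespace not in grouped:
--                 grouped[namespace] = {}
--             grouped[namespace][subkey] = value
--         else:
--             # Put non-namespaced items in 'context' namespace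
--             if "context" not in grouped:
--                 grouped["context"] = {}
--             grouped["context"][key] = value
--
--     return grouped
-- ===== SOURCE B (Python) =====
-- from typing import Any
--
--
-- def x__group_foundation_error_context__mutmut_orig(error_context: dict[str, Any]) -> dict[str, dict[str, Any]]:
--     """Group FoundationError context items by namespace (triples + grouped comprehension)."""
--     triples = []
--     for key, value in error_context.items():
--         namespace, subkey = key.split(".", 1) if "." in key else ("context", key)
--         triples.append((namespace, subkey, value))
--     return {
--         ns: {sub: val for n, sub, val in triples if n == ns}
--         for ns in dict.fromkeys(n for n, _, _ in triples)
--     }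
-- ===== Notes on version B (the rewrite author's own statement) =====
-- stated objective: alternative
-- what changed: A's incremental check-then-insert dict bookkeeping is replaced by one pass building (namespace, subkey, value) triples followed by a grouped dict comprehension per distinct namespace (dict.fromkeys for first-occurrence order).
import Mathlib
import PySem

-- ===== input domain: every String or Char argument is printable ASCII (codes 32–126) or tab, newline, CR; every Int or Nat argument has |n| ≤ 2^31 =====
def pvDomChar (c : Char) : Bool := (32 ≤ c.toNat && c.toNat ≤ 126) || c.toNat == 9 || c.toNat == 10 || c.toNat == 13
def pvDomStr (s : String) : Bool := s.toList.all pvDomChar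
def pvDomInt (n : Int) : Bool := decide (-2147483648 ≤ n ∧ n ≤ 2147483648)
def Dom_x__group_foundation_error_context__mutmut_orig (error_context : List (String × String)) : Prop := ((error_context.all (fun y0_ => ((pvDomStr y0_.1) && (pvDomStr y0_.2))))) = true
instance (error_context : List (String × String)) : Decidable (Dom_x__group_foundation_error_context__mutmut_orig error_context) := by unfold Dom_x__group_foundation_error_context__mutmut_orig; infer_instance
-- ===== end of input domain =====

-- B replaces A's incremental check-then-insert bookkeeping with one pass building
-- (namespace, subkey, value) triples and a grouped dict comprehension per distinct
-- namespace (objective: alternative decomposition, same observable output).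

-- key.split(".", 1) for a key containing "." : exactly two pieces.
-- (splitMax? with sep "." is always `some`; the fallback arm is unreachable when "." ∈ key.)
def pvSplitKey (key : String) : String × String :=
  match PySem.Str.splitMax? key "." 1 with
  | some (a :: b :: _) => (a, b)
  | _ => ("", key)

-- ===== PORT A =====
def x__group_foundation_error_context__mutmut_orig (error_context : List (String × String)) : List (String × List (String × String)) :=
  let grouped : PySem.Dict String (PySem.Dict String String) :=
    error_context.foldl (fun grouped kv =>
      let key := kv.1
      let value := kv.2
      if PySem.Str.isIn "." key then
        let namespace_ := (pvSplitKey key).1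
        let subkey := (pvSplitKey key).2
        -- if namespace not in grouped: grouped[namespace] = {}
        let grouped := if grouped.contains namespace_ = false then grouped.insert namespace_ PySem.Dict.empty else grouped
        -- grouped[namespace][subkey] = value  (read inner dict, update, write back)
        grouped.insert namespace_ ((grouped.getD namespace_ PySem.Dict.empty).insert subkey value)
      else
        -- if "context" not in grouped: grouped["context"] = {}
        let grouped := if grouped.contains "context" = false then grouped.insert "context" PySem.Dict.empty else grouped
        -- grouped["context"][key] = value
        grouped.insert "context" ((grouped.getD "context" PySem.Dict.empty).insert key value))
      PySem.Dict.empty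
  grouped.items.map (fun p => (p.1, p.2.items))

-- ===== PORT B =====
-- namespace, subkey = key.split(".", 1) if "." in key else ("context", key)
def pvTrip (kv : String × String) : String × String × String :=
  if PySem.Str.isIn "." kv.1 then ((pvSplitKey kv.1).1, (pvSplitKey kv.1).2, kv.2)
  else ("context", kv.1, kv.2)

def x__group_foundation_error_context__mutmut_orig_alt (error_context : List (String × String)) : List (String × List (String × String)) :=
  let triples := error_context.map pvTrip
  let namespaces := PySem.List.dedup (triples.map (·.1))   -- dict.fromkeys(...)
  namespaces.map (fun ns =>
    (ns, ((triples.filter (fun t => t.1 == ns)).foldl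
            (fun d t => d.insert t.2.1 t.2.2)
            (PySem.Dict.empty : PySem.Dict String String)).items))

-- ===== PRECONDITION & SPEC =====
def Spec_x__group_foundation_error_context__mutmut_orig (error_context : List (String × String)) (out : List (String × List (String × String))) : Prop := out = x__group_foundation_error_context__mutmut_orig_alt error_context
instance (error_context : List (String × String)) (out : List (String × List (String × String))) : Decidable (Spec_x__group_foundation_error_context__mutmut_orig error_context out) := by unfold Spec_x__group_foundation_error_context__mutmut_orig; infer_instance

-- ===== CLAIM (what is proved, stated in full; the proofs are below) =====
def Claim_equal_x__group_foundation_error_context__mutmut_orig : Prop := ∀ (error_context : List (String × String)), Dom_x__group_foundation_error_context__mutmut_orig error_context → Spec_x__group_foundation_error_context__mutmut_orig error_context (x__group_foundation_error_context__mutmut_orig error_context)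

-- ===== LEMMAS AND PROOFS =====

-- the combined effect of A's loop body, as one insert
def pvIns (g : PySem.Dict String (PySem.Dict String String)) (t : String × String × String) : PySem.Dict String (PySem.Dict String String) :=
  g.insert t.1 ((g.getD t.1 PySem.Dict.empty).insert t.2.1 t.2.2)

lemma pvStepA_eq (g : PySem.Dict String (PySem.Dict String String)) (kv : String × String) :
    (if PySem.Str.isIn "." kv.1 then
        let namespace_ := (pvSplitKey kv.1).1
        let subkey := (pvSplitKey kv.1).2
        let g' := if g.contains namespace_ = false then g.insert namespace_ PySem.Dict.empty else g
        g'.insert namespace_ ((g'.getD namespace_ PySem.Dict.empty).insert subkey kv.2)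
      else
        let g' := if g.contains "context" = false then g.insert "context" PySem.Dict.empty else g
        g'.insert "context" ((g'.getD "context" PySem.Dict.empty).insert kv.1 kv.2))
      = pvIns g (pvTrip kv) := by
  by_cases hin : PySem.Str.isIn "." kv.1 = true
  · simp only [hin, if_pos, pvTrip, pvIns]
    by_cases hc : g.contains (pvSplitKey kv.1).1 = true
    · simp [hc]
    · simp only [Bool.not_eq_true] at hc
      simp [hc, PySem.Dict.getD_insert_self, PySem.Dict.insert_insert_self,
        PySem.Dict.getD_of_not_contains _ _ hc]
  · simp only [Bool.not_eq_true] at hin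
    simp only [hin, Bool.false_eq_true, if_false, pvTrip, pvIns]
    by_cases hc : g.contains "context" = true
    · simp [hc]
    · simp only [Bool.not_eq_true] at hc
      simp [hc, PySem.Dict.getD_insert_self, PySem.Dict.insert_insert_self,
        PySem.Dict.getD_of_not_contains _ _ hc]

-- inner group dict for a namespace
def pvGroup (ts : List (String × String × String)) (ns : String) : PySem.Dict String String :=
  (ts.filter (fun t => t.1 == ns)).foldl (fun d t => d.insert t.2.1 t.2.2) PySem.Dict.empty

lemma pvInv (ts : List (String × String × String)) :
    (ts.foldl pvIns PySem.Dict.empty).items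
      = (PySem.List.dedup (ts.map (·.1))).map (fun ns => (ns, pvGroup ts ns)) := by
  induction ts using List.reverseRecOn with
  | nil => simp [PySem.List.dedup, PySem.Set.ofList, PySem.Dict.empty]
  | append_singleton ts t ih =>
    have hkeys : (ts.foldl pvIns PySem.Dict.empty).keys = PySem.List.dedup (ts.map (·.1)) := by
      simp [PySem.Dict.keys, ih, List.map_map, Function.comp_def]
    have hnodup : (ts.foldl pvIns PySem.Dict.empty).keys.Nodup := by
      rw [hkeys]; exact PySem.List.nodup_dedup _
    have hded : PySem.List.dedup ((ts ++ [t]).map (·.1))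
        = PySem.Set.add (PySem.List.dedup (ts.map (·.1))) t.1 := by
      simp only [PySem.List.dedup_eq_ofList, PySem.Set.ofList_eq_foldl, List.map_append,
        List.foldl_append, List.map_cons, List.map_nil, List.foldl_cons, List.foldl_nil]
    have hgroup : ∀ ns, pvGroup (ts ++ [t]) ns
        = if t.1 == ns then (pvGroup ts ns).insert t.2.1 t.2.2 else pvGroup ts ns := by
      intro ns
      simp only [pvGroup, List.filter_append, List.foldl_append]
      by_cases h : t.1 == ns
      · simp [h]
      · simp [h]
    rw [List.foldl_append, List.foldl_cons, List.foldl_nil]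
    by_cases hc : (ts.foldl pvIns PySem.Dict.empty).contains t.1 = true
    · -- t.1 already a key: update in place
      have hmem : t.1 ∈ PySem.List.dedup (ts.map (·.1)) := by
        rw [← hkeys]; exact (PySem.Dict.contains_iff_mem_keys _ _).1 hc
      have hadd : PySem.Set.add (PySem.List.dedup (ts.map (·.1))) t.1
          = PySem.List.dedup (ts.map (·.1)) := by
        simp only [PySem.Set.add]
        rw [if_pos ((PySem.Set.contains_iff _ _).2 hmem)]
      have hgetD : (ts.foldl pvIns PySem.Dict.empty).getD t.1 PySem.Dict.empty
          = pvGroup ts t.1 := by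
        apply PySem.Dict.getD_of_mem_items _ _ hnodup
        rw [ih]
        exact List.mem_map_of_mem hmem
      rw [pvIns, PySem.Dict.items_insert_of_contains _ _ hc, hded, hadd, ih, hgetD,
        List.map_map]
      apply List.map_congr_left
      intro ns _
      simp only [Function.comp_apply, hgroup ns]
      by_cases h : ns = t.1
      · subst h; simp
      · have h1 : (ns == t.1) = false := beq_eq_false_iff_ne.2 h
        have h2 : (t.1 == ns) = false := beq_eq_false_iff_ne.2 (Ne.symm h)
        simp [h1, h2]
    · -- fresh namespace: appended at the end
      simp only [Bool.not_eq_true] at hc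
      have hnmem : t.1 ∉ PySem.List.dedup (ts.map (·.1)) := by
        rw [← hkeys]
        intro hm
        exact absurd ((PySem.Dict.contains_iff_mem_keys _ _).2 hm) (by simp [hc])
      have hadd : PySem.Set.add (PySem.List.dedup (ts.map (·.1))) t.1
          = PySem.List.dedup (ts.map (·.1)) ++ [t.1] := by
        simp only [PySem.Set.add]
        rw [if_neg (by simp only [PySem.Set.contains_iff]; exact hnmem)]
      have hfilt : pvGroup ts t.1 = PySem.Dict.empty := by
        have : ts.filter (fun t' => t'.1 == t.1) = [] := by
          apply List.filter_eq_nil_iff.2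
          intro x hx hbeq
          exact hnmem (by
            rw [PySem.List.dedup_eq_ofList]
            have : x.1 = t.1 := beq_iff_eq.1 hbeq
            rw [← this]
            exact (PySem.Set.mem_ofList _ _).2 (List.mem_map_of_mem hx))
        simp [pvGroup, this]
      rw [pvIns, PySem.Dict.items_insert_of_not_contains _ _ hc, hded, hadd, ih,
        PySem.Dict.getD_of_not_contains _ _ hc, List.map_append]
      congr 1
      · apply List.map_congr_left
        intro ns hns
        have h' : (t.1 == ns) = false := by
          simp only [beq_eq_false_iff_ne]
          intro e; exact hnmem (e ▸ hns)
        simp [hgroup ns, h']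
      · simp only [List.map_cons, List.map_nil, List.cons.injEq, Prod.mk.injEq, and_true,
          true_and]
        rw [hgroup t.1]
        simp [hfilt]

lemma pvFold_eq (ec : List (String × String)) :
    ec.foldl (fun grouped kv =>
      let key := kv.1
      let value := kv.2
      if PySem.Str.isIn "." key then
        let namespace_ := (pvSplitKey key).1
        let subkey := (pvSplitKey key).2
        let grouped := if grouped.contains namespace_ = false then grouped.insert namespace_ PySem.Dict.empty else grouped
        grouped.insert namespace_ ((grouped.getD namespace_ PySem.Dict.empty).insert subkey value)
      else
        let grouped := if grouped.contains "context" = false then grouped.insert "context" PySem.Dict.empty else grouped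
        grouped.insert "context" ((grouped.getD "context" PySem.Dict.empty).insert key value))
      PySem.Dict.empty
      = (ec.map pvTrip).foldl pvIns PySem.Dict.empty := by
  rw [List.foldl_map]
  apply PySem.List.foldl_congr_mem _ _ _ _
  intro g kv _
  exact pvStepA_eq g kv

-- ===== VERDICT (by name: the statement is the Claim_ definition above) =====
theorem x__group_foundation_error_context__mutmut_orig_spec : Claim_equal_x__group_foundation_error_context__mutmut_orig := by
  intro ec _
  show _ = _
  simp only [x__group_foundation_error_context__mutmut_orig,
    x__group_foundation_error_context__mutmut_orig_alt]
  rw [pvFold_eq, pvInv, List.map_map]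
  rfl
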